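-- pv_equiv track=rewrite | github.com/huseyingulme/Kriptoloji | algorithms/RouteCipher.py | _spiral_write
-- ===== SOURCE A (Python) =====
-- def _spiral_write(text: str, rows: int, cols: int) -> list:
--     """Spiral rota ile yazar (saat yönünde dıştan içe)."""
--     matrix = [[' ' for _ in range(cols)] for _ in range(rows)]
--     text_idx = 0
--     top, bottom = 0, rows - 1
--     left, right = 0, cols - 1
--
--     while top <= bottom and left <= right and text_idx < len(text):
--         # Sağa
--         for i in range(left, right + 1):
--             if text_idx < len(text):
--                 matrix[top][i] = text[text_idx]
--                 text_idx += 1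
--         top += 1
--
--         # Aşağı
--         for i in range(top, bottom + 1):
--             if text_idx < len(text):
--                 matrix[i][right] = text[text_idx]
--                 text_idx += 1
--         right -= 1
--
--         # Sola
--         if top <= bottom:
--             for i in range(right, left - 1, -1):
--                 if text_idx < len(text):
--                     matrix[bottom][i] = text[text_idx]
--                     text_idx += 1
--             bottom -= 1
--
--         # Yukarı
--         if left <= right:
--             for i in range(bottom, top - 1, -1):
--                 if text_idx < len(text):
--                     matrix[i][left] = text[text_idx]
--                     text_idx += 1
--             left += 1
--
--     return matrix
-- ===== SOURCE B (Python) =====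
-- def _spiral_coords(rows, cols, limit):
--     """First min(limit, rows*cols) cell coordinates of the clockwise outside-in
--     spiral of a rows x cols grid, produced by repeatedly peeling the top row of a
--     clockwise-rotated frame.  The accumulated rotation is kept as an affine
--     transform (i, j) |-> (ai*i + aj*j + ac, bi*i + bj*j + bc)."""
--     coords = []
--     ai, aj, ac = 1, 0, 0
--     bi, bj, bc = 0, 1, 0
--     r, c = rows, cols
--     while r > 0 and c > 0 and len(coords) < limit:
--         take = min(c, limit - len(coords))
--         for j in range(take):
--             coords.append((aj * j + ac, bj * j + bc))
--         # compose with one step of rotation: (i, j) |-> (1 + j, c - 1 - i)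
--         ai, aj, ac = -aj, ai, ai + aj * (c - 1) + ac
--         bi, bj, bc = -bj, bi, bi + bj * (c - 1) + bc
--         r, c = c, r - 1
--     return coords
--
--
-- def _spiral_write(text: str, rows: int, cols: int) -> list:
--     matrix = [[' '] * cols for _ in range(rows)]
--     for (i, j), ch in zip(_spiral_coords(rows, cols, len(text)), text):
--         matrix[i][j] = ch
--     return matrix
-- ===== Notes on version B (the rewrite author's own statement) =====
-- stated objective: alternative
-- what changed: Replaces the four-sided boundary while-loop (mutable top/bottom/left/right with four directional for-loops and per-cell 'still have text' checks) by first generating only the first min(len(text), rows*cols) spiral coordinates via repeated top-row peeling of a clockwise-rotated frame (the rotation kept as an affine transform updated in O(1) per peeled row), then filling the matrix with zip(coords, text).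
import Mathlib
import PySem

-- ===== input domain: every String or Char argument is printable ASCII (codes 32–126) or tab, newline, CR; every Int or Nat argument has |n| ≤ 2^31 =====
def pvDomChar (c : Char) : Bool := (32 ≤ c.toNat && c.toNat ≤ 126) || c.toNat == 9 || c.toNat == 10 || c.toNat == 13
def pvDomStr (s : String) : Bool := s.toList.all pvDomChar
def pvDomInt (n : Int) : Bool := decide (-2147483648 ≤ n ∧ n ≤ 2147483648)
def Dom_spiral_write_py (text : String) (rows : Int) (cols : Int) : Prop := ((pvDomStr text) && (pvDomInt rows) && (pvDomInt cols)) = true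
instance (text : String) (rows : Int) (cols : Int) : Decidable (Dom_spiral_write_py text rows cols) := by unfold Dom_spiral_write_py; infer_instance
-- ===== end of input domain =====

-- B replaces A's four-sided boundary while-loop by generating the spiral coordinate
-- stream via repeated top-row peeling of a rotated frame (rotation kept as an affine
-- transform), then filling the matrix along zip(coords, text); alternative, not faster.


-- ===== PORT A =====

-- matrix[i][j] = v (shared by both ports); exact whenever 0 ≤ i, 0 ≤ j and both are in
-- range, which holds at every write either program performs (Python would raise
-- IndexError otherwise; that point is never reached).
def pvSet2 (m : List (List String)) (i j : Int) (v : String) : List (List String) :=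
  m.modify i.toNat (fun row => row.set j.toNat v)

-- one inner for-loop of A: 'for i in idxs: if text_idx < len(text): matrix[pos i] = text[text_idx]; text_idx += 1'
-- (text[text_idx] is a one-character string: String.ofList [·] of the character PySem.Str.pyGet? yields;
-- the default ' ' is unreachable because the write is guarded by text_idx < len(text))
def pvSegA (text : String) (pos : Int → Int × Int) (idxs : List Int)
    (st : List (List String) × Int) : List (List String) × Int :=
  idxs.foldl (fun st i =>
    if st.2 < PySem.Str.len text then
      (pvSet2 st.1 (pos i).1 (pos i).2 (String.ofList [(PySem.Str.pyGet? text st.2).getD ' ']), st.2 + 1)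
    else st) st

-- A's while loop; fuel rows.toNat + 1 bounds the number of iterations (top increases each round)
def pvLoopA (text : String) : Nat → List (List String) → Int → Int → Int → Int → Int → List (List String)
  | 0, m, _, _, _, _, _ => m
  | fuel+1, m, t, top, bottom, left, right =>
    if top ≤ bottom ∧ left ≤ right ∧ t < PySem.Str.len text then
      let s1 := pvSegA text (fun i => (top, i)) (PySem.List.pyRange left (right+1) 1) (m, t)
      let top := top + 1
      let s2 := pvSegA text (fun i => (i, right)) (PySem.List.pyRange top (bottom+1) 1) s1
      let right := right - 1
      let s3 : (List (List String) × Int) × Int :=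
        if top ≤ bottom then
          (pvSegA text (fun i => (bottom, i)) (PySem.List.pyRange right (left-1) (-1)) s2, bottom - 1)
        else (s2, bottom)
      let bottom := s3.2
      let s4 : (List (List String) × Int) × Int :=
        if left ≤ right then
          (pvSegA text (fun i => (i, left)) (PySem.List.pyRange bottom (top-1) (-1)) s3.1, left + 1)
        else (s3.1, left)
      pvLoopA text fuel s4.1.1 s4.1.2 top bottom s4.2 right
    else m

def spiral_write_py (text : String) (rows : Int) (cols : Int) : List (List String) :=
  let matrix := (PySem.List.pyRange 0 rows 1).map (fun _ => (PySem.List.pyRange 0 cols 1).map (fun _ => " "))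
  pvLoopA text (rows.toNat + 1) matrix 0 0 (rows - 1) 0 (cols - 1)

-- ===== PORT B =====

-- Source B's while loop of _spiral_coords: peel the top row of the current frame (capped at the
-- remaining budget 'limit - len(coords)'), emitting its cells through the accumulated affine
-- transform (i,j) ↦ (ai*i + aj*j + ac, bi*i + bj*j + bc), then compose the transform with one
-- clockwise rotation and swap to the rotated frame; fuel (rows+cols).toNat bounds the
-- iterations (r + c decreases by 1 each round)
def pvCoordsB (limit : Int) : Nat → Int → Int → Int → Int → Int → Int → Int → Int → List (Int × Int) → List (Int × Int)
  | 0, _, _, _, _, _, _, _, _, acc => acc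
  | fuel+1, ai, aj, ac, bi, bj, bc, r, c, acc =>
    if 0 < r ∧ 0 < c ∧ (acc.length : Int) < limit then
      let take := min c (limit - acc.length)
      let acc := acc ++ (PySem.List.pyRange 0 take 1).map (fun j => (aj * j + ac, bj * j + bc))
      pvCoordsB limit fuel (-aj) ai (ai + aj * (c-1) + ac) (-bj) bi (bi + bj * (c-1) + bc) c (r-1) acc
    else acc

def spiral_write_py_alt (text : String) (rows : Int) (cols : Int) : List (List String) :=
  let matrix := (PySem.List.pyRange 0 rows 1).map (fun _ => List.replicate cols.toNat " ")
  let coords := pvCoordsB (PySem.Str.len text) (rows + cols).toNat 1 0 0 0 1 0 rows cols []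
  (coords.zip text.toList).foldl (fun m p => pvSet2 m p.1.1 p.1.2 (String.ofList [p.2])) matrix

-- ===== PRECONDITION & SPEC =====
def Spec_spiral_write_py (text : String) (rows : Int) (cols : Int) (out : List (List String)) : Prop := out = spiral_write_py_alt text rows cols
instance (text : String) (rows : Int) (cols : Int) (out : List (List String)) : Decidable (Spec_spiral_write_py text rows cols out) := by unfold Spec_spiral_write_py; infer_instance

-- ===== CLAIM (what is proved, stated in full; the proofs are below) =====
def Claim_equal_spiral_write_py : Prop := ∀ (text : String) (rows : Int) (cols : Int), Dom_spiral_write_py text rows cols → Spec_spiral_write_py text rows cols (spiral_write_py text rows cols)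

-- ===== LEMMAS AND PROOFS =====

def pvRotN : Nat → Nat → List (Nat × Nat)
  | r, c =>
    if _h : r = 0 ∨ c = 0 then []
    else (List.range c).map (fun j => (0, j)) ++
      (pvRotN c (r-1)).map (fun p => (1 + p.2, c - 1 - p.1))
  termination_by r c => r + c
  decreasing_by omega

theorem pvRotN_zero_left (c : Nat) : pvRotN 0 c = [] := by rw [pvRotN]; simp

theorem pvRotN_zero_right (r : Nat) : pvRotN r 0 = [] := by rw [pvRotN]; simp

theorem pvRotN_mem_lt {r c : Nat} {p : Nat × Nat} (h : p ∈ pvRotN r c) : p.1 < r ∧ p.2 < c := by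
  induction r, c using pvRotN.induct generalizing p with
  | case1 r c h0 => rw [pvRotN] at h; simp [h0] at h
  | case2 r c h0 ih =>
    rw [pvRotN] at h
    rw [dif_neg h0] at h
    simp only [List.mem_append, List.mem_map, List.mem_range] at h
    rcases h with ⟨j, hj, rfl⟩ | ⟨q, hq, rfl⟩
    · omega
    · have := ih hq; omega

theorem pvCoordsB_eq (limit : Int) : ∀ (fuel : Nat) (ai aj ac bi bj bc r c : Int) (acc : List (Int × Int)),
    (r + c).toNat ≤ fuel →
    pvCoordsB limit fuel ai aj ac bi bj bc r c acc =
      acc ++ ((pvRotN r.toNat c.toNat).map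
        (fun p => (ai * p.1 + aj * p.2 + ac, bi * p.1 + bj * p.2 + bc))).take
          (limit - acc.length).toNat := by
  intro fuel
  induction fuel with
  | zero =>
    intro ai aj ac bi bj bc r c acc hf
    have : r.toNat = 0 ∨ c.toNat = 0 := by omega
    rcases this with h | h <;> simp [pvCoordsB, h, pvRotN]
  | succ fuel ih =>
    intro ai aj ac bi bj bc r c acc hf
    rw [pvCoordsB]
    by_cases hg : 0 < r ∧ 0 < c ∧ (acc.length : Int) < limit
    · rw [if_pos hg]
      obtain ⟨hr, hc, hlim⟩ := hg
      rw [ih _ _ _ _ _ _ _ _ _ (by omega)]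
      have hr0 : ¬ (r.toNat = 0 ∨ c.toNat = 0) := by omega
      have h2 : ((r - 1).toNat : Nat) = r.toNat - 1 := by omega
      rw [PySem.List.pyRange_one, h2]
      conv_rhs => rw [pvRotN, dif_neg hr0]
      rw [List.map_append, List.take_append]
      simp only [List.map_map, List.append_assoc, sub_zero]
      congr 1
      congr 1
      · -- emitted top-row chunk = take of the first segment
        rw [← List.map_take, List.take_range]
        have hmin : min (limit - (acc.length : Int)).toNat c.toNat
            = (min c (limit - (acc.length : Int))).toNat := by omega
        rw [hmin]
        refine List.map_congr_left (fun k _ => ?_)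
        simp only [Function.comp, Prod.mk.injEq]
        push_cast
        constructor <;> ring
      · -- the rest: recursive take with the reduced budget
        simp only [List.length_append, List.length_map, List.length_range]
        congr 1
        · omega
        refine List.map_congr_left (fun p hp => ?_)
        have hb := pvRotN_mem_lt hp
        simp only [Function.comp, Prod.mk.injEq]
        have e1 : ((c.toNat - 1 - p.1 : Nat) : Int) = c - 1 - (p.1 : Int) := by omega
        have e2 : (((1 + p.2 : Nat)) : Int) = 1 + (p.2 : Int) := by push_cast; ring
        rw [e1, e2]
        constructor <;> ring
    · rw [if_neg hg]
      rcases (by omega : r.toNat = 0 ∨ c.toNat = 0 ∨ ¬ ((acc.length : Int) < limit)) with h | h | h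
      · simp [h, pvRotN]
      · simp [h, pvRotN]
      · rw [show (limit - (acc.length : Int)).toNat = 0 from by omega]
        simp

def pvSetN (m : List (List String)) (i j : Nat) (v : String) : List (List String) :=
  m.modify i (fun row => row.set j v)

def pvFillN (m : List (List String)) (l : List ((Nat × Nat) × Char)) : List (List String) :=
  l.foldl (fun m p => pvSetN m p.1.1 p.1.2 (String.ofList [p.2])) m

theorem pvFoldB_eq : ∀ (ps : List (Nat × Nat)) (l : List Char) (m0 : List (List String)),
    ((ps.map (fun p => ((p.1 : Int), (p.2 : Int)))).zip l).foldl
      (fun m p => pvSet2 m p.1.1 p.1.2 (String.ofList [p.2])) m0 = pvFillN m0 (ps.zip l) := by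
  intro ps
  induction ps with
  | nil => intro l m0; simp [pvFillN]
  | cons p ps ih =>
    intro l m0
    cases l with
    | nil => simp [pvFillN]
    | cons ch l =>
      simp only [List.map_cons, List.zip_cons_cons, List.foldl_cons]
      rw [ih]
      simp [pvFillN, pvSet2, pvSetN]

theorem pvRow_eq (cols : Int) :
    (PySem.List.pyRange 0 cols 1).map (fun _ => " ") = List.replicate cols.toNat " " := by
  rw [PySem.List.pyRange_one, List.map_map]
  rw [show ((fun _ => " ") ∘ fun k : Nat => (0:Int) + k) = (fun _ => " ") from rfl, List.map_const']
  simp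

theorem pvZip_take {α β : Type} : ∀ (xs : List α) (l : List β),
    (xs.take l.length).zip l = xs.zip l := by
  intro xs
  induction xs with
  | nil => intro l; simp
  | cons x xs ih =>
    intro l
    cases l with
    | nil => simp
    | cons y l => simp [ih]

theorem pvAlt_eq (text : String) (rows cols : Int) :
    spiral_write_py_alt text rows cols =
      pvFillN ((PySem.List.pyRange 0 rows 1).map (fun _ => (PySem.List.pyRange 0 cols 1).map (fun _ => " ")))
        ((pvRotN rows.toNat cols.toNat).zip text.toList) := by
  unfold spiral_write_py_alt
  rw [pvCoordsB_eq _ _ _ _ _ _ _ _ _ _ _ (le_refl _)]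
  have hid : (pvRotN rows.toNat cols.toNat).map
      (fun p => ((1:Int) * p.1 + 0 * p.2 + 0, (0:Int) * p.1 + 1 * p.2 + 0)) =
      (pvRotN rows.toNat cols.toNat).map (fun p => ((p.1 : Int), (p.2 : Int))) := by
    refine List.map_congr_left (fun p _ => ?_); simp
  have hbudget : (PySem.Str.len text - ((List.length ([] : List (Int × Int))) : Int)).toNat
      = text.toList.length := by
    rw [PySem.Str.len_eq]; simp
  simp only [List.nil_append, hid, hbudget]
  rw [← List.map_take, pvFoldB_eq, pvZip_take]
  congr 1
  refine List.map_congr_left (fun _ _ => ?_)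
  exact (pvRow_eq cols).symm

def pvSegW (text : String) (ps : List (Nat × Nat)) (st : List (List String) × Int) : List (List String) × Int :=
  ps.foldl (fun st p =>
    if st.2 < PySem.Str.len text then
      (pvSetN st.1 p.1 p.2 (String.ofList [(PySem.Str.pyGet? text st.2).getD ' ']), st.2 + 1)
    else st) st

theorem pvSegA_eq_segW (text : String) (pos : Int → Int × Int) (idxs : List Int)
    (st : List (List String) × Int) :
    pvSegA text pos idxs st = pvSegW text (idxs.map (fun i => ((pos i).1.toNat, (pos i).2.toNat))) st := by
  simp [pvSegA, pvSegW, List.foldl_map, pvSet2, pvSetN]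

theorem pvSegW_append (text : String) (ps qs : List (Nat × Nat)) (st : List (List String) × Int) :
    pvSegW text (ps ++ qs) st = pvSegW text qs (pvSegW text ps st) := by
  simp [pvSegW, List.foldl_append]

theorem pvSegW_stuck (text : String) (ps : List (Nat × Nat)) (m : List (List String)) (t : Int)
    (h : ¬ t < PySem.Str.len text) : pvSegW text ps (m, t) = (m, t) := by
  induction ps with
  | nil => rfl
  | cons p ps ih => simp only [pvSegW, List.foldl_cons] at *; rw [if_neg h]; exact ih

theorem pvSegW_eq (text : String) : ∀ (ps : List (Nat × Nat)) (m : List (List String)) (t : Int),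
    0 ≤ t →
    pvSegW text ps (m, t) =
      (pvFillN m (ps.zip (text.toList.drop t.toNat)),
       t + (ps.zip (text.toList.drop t.toNat)).length) := by
  intro ps
  induction ps with
  | nil => intro m t _; simp [pvSegW, pvFillN]
  | cons p ps ih =>
    intro m t ht
    by_cases h : t < PySem.Str.len text
    · have hlen : t < (text.toList.length : Int) := by
        rwa [PySem.Str.len_eq] at h
      have htn : t.toNat < text.toList.length := by omega
      have hdrop : text.toList.drop t.toNat = text.toList[t.toNat] :: text.toList.drop (t.toNat + 1) :=
        List.drop_eq_getElem_cons htn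
      have hchar : (PySem.Str.pyGet? text t).getD ' ' = text.toList[t.toNat] := by
        have e : PySem.Str.pyGet? text t = PySem.Str.pyGet? text ((t.toNat : Nat) : Int) := by
          congr 1; omega
        rw [e, PySem.Str.pyGet?_natCast]
        simp [List.getElem?_eq_getElem htn]
      simp only [pvSegW, List.foldl_cons, if_pos h]
      have := ih (pvSetN m p.1 p.2 (String.ofList [(PySem.Str.pyGet? text t).getD ' '])) (t + 1) (by omega)
      simp only [pvSegW] at this
      rw [this, hdrop]
      have : (t + 1).toNat = t.toNat + 1 := by omega
      rw [this]
      simp only [List.zip_cons_cons, List.length_cons, pvFillN, List.foldl_cons, hchar]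
      simp only [Prod.mk.injEq]
      exact ⟨trivial, by push_cast; ring⟩
    · rw [pvSegW_stuck text _ m t h]
      have : text.toList.drop t.toNat = [] := by
        apply List.drop_eq_nil_of_le
        rw [PySem.Str.len_eq] at h; omega
      simp [this, pvFillN]

theorem pvRotN_unfold (r c : Nat) (hr : r ≠ 0) (hc : c ≠ 0) :
    pvRotN r c = (List.range c).map (fun j => (0, j)) ++
      (pvRotN c (r-1)).map (fun p => (1 + p.2, c - 1 - p.1)) := by
  rw [pvRotN, dif_neg (by omega : ¬ (r = 0 ∨ c = 0))]

theorem pvRotN_row (c : Nat) : pvRotN 1 c = (List.range c).map (fun j => (0, j)) := by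
  by_cases hc : c = 0
  · simp [hc, pvRotN_zero_right]
  · rw [pvRotN_unfold 1 c (by omega) hc]
    simp [pvRotN_zero_right]

theorem pvRotN_col (r : Nat) (hr : 1 ≤ r) :
    pvRotN r 1 = (0, 0) :: (List.range (r-1)).map (fun j => (1 + j, 0)) := by
  rw [pvRotN_unfold r 1 (by omega) (by omega), pvRotN_row]
  simp [List.map_map]

theorem pvRotN_peel (r c : Nat) (hr : 2 ≤ r) (hc : 2 ≤ c) :
    pvRotN r c = (List.range c).map (fun j => (0, j))
      ++ (List.range (r-1)).map (fun j => (1 + j, c - 1))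
      ++ (List.range (c-1)).map (fun j => (r - 1, c - 2 - j))
      ++ (List.range (r-2)).map (fun j => (r - 2 - j, 0))
      ++ (pvRotN (r-2) (c-2)).map (fun p => (1 + p.1, 1 + p.2)) := by
  rw [pvRotN_unfold r c (by omega) (by omega),
      pvRotN_unfold c (r-1) (by omega) (by omega),
      pvRotN_unfold (r-1) (c-1) (by omega) (by omega)]
  simp only [show r - 1 - 1 = r - 2 from by omega, show c - 1 - 1 = c - 2 from by omega]
  have e2 : List.map (fun p : Nat × Nat => (1 + p.2, c - 1 - p.1))
        (List.map (fun j : Nat => ((0 : Nat), j)) (List.range (r-1)))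
      = List.map (fun j => (1 + j, c - 1)) (List.range (r-1)) := by
    rw [List.map_map]
    refine List.map_congr_left (fun j hj => ?_)
    simp at hj ⊢
  have e3 : List.map (fun p : Nat × Nat => (1 + p.2, c - 1 - p.1))
        (List.map (fun p : Nat × Nat => (1 + p.2, r - 2 - p.1))
          (List.map (fun j : Nat => ((0 : Nat), j)) (List.range (c-1))))
      = List.map (fun j => (r - 1, c - 2 - j)) (List.range (c-1)) := by
    rw [List.map_map, List.map_map]
    refine List.map_congr_left (fun j hj => ?_)
    simp at hj ⊢; omega
  by_cases hr2 : r = 2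
  · have hz : pvRotN (c-1) (r-2) = [] := by
      rw [show r - 2 = 0 from by omega]; exact pvRotN_zero_right _
    have hz2 : List.range (r-2) = [] := by rw [show r - 2 = 0 from by omega]; rfl
    have hz3 : pvRotN (r-2) (c-2) = [] := by
      rw [show r - 2 = 0 from by omega]; exact pvRotN_zero_left _
    rw [hz, hz2, hz3]
    simp only [List.map_nil, List.append_nil]
    simp only [List.map_append]
    rw [e2, e3]
    simp [List.append_assoc]
  · rw [pvRotN_unfold (c-1) (r-2) (by omega) (by omega)]
    simp only [show c - 1 - 1 = c - 2 from by omega]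
    have e4 : List.map (fun p : Nat × Nat => (1 + p.2, c - 1 - p.1))
          (List.map (fun p : Nat × Nat => (1 + p.2, r - 2 - p.1))
            (List.map (fun p : Nat × Nat => (1 + p.2, c - 2 - p.1))
              (List.map (fun j : Nat => ((0 : Nat), j)) (List.range (r-2)))))
        = List.map (fun j => (r - 2 - j, 0)) (List.range (r-2)) := by
      rw [List.map_map, List.map_map, List.map_map]
      refine List.map_congr_left (fun j hj => ?_)
      simp at hj ⊢; omega
    have e5 : List.map (fun p : Nat × Nat => (1 + p.2, c - 1 - p.1))
          (List.map (fun p : Nat × Nat => (1 + p.2, r - 2 - p.1))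
            (List.map (fun p : Nat × Nat => (1 + p.2, c - 2 - p.1))
              (List.map (fun p : Nat × Nat => (1 + p.2, r - 2 - 1 - p.1))
                (pvRotN (r-2) (c-2)))))
        = List.map (fun p => (1 + p.1, 1 + p.2)) (pvRotN (r-2) (c-2)) := by
      rw [List.map_map, List.map_map, List.map_map]
      refine List.map_congr_left (fun p hp => ?_)
      have hb := pvRotN_mem_lt hp
      simp; omega
    simp only [List.map_append]
    rw [e2, e3, e4, e5]
    simp [List.append_assoc]

theorem pvZip_append {α β : Type} (ps qs : List α) (l : List β) :
    (ps ++ qs).zip l = ps.zip l ++ qs.zip (l.drop ps.length) := by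
  induction ps generalizing l with
  | nil => simp
  | cons p ps ih =>
    cases l with
    | nil => simp
    | cons x l => simp [ih]

theorem pvDrop_zip_len {α β : Type} (ps : List α) (l : List β) :
    l.drop ((ps.zip l).length) = l.drop ps.length := by
  rcases Nat.le_total ps.length l.length with h | h
  · rw [List.length_zip]; congr 1; omega
  · rw [List.length_zip, List.drop_eq_nil_of_le (by omega), List.drop_eq_nil_of_le h]

theorem pvFillN_append (m : List (List String)) (x y : List ((Nat × Nat) × Char)) :
    pvFillN m (x ++ y) = pvFillN (pvFillN m x) y := by
  simp [pvFillN, List.foldl_append]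

theorem pvGlue (m : List (List String)) (P Q : List (Nat × Nat)) (l : List Char) :
    pvFillN (pvFillN m (P.zip l)) (Q.zip (l.drop ((P.zip l).length))) = pvFillN m ((P ++ Q).zip l) := by
  rw [pvZip_append, pvFillN_append, pvDrop_zip_len]

theorem pvSegW_nil (text : String) (st : List (List String) × Int) : pvSegW text [] st = st := rfl

theorem pvFillN_nil (m : List (List String)) : pvFillN m [] = m := rfl

theorem pvRing_concat (top bottom left right : Int) (htop : 0 ≤ top) (hleft : 0 ≤ left)
    (hS : top + 1 ≤ bottom) (hY : left ≤ right - 1) :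
    (PySem.List.pyRange left (right+1) 1).map (fun i => (top.toNat, i.toNat)) ++
      ((PySem.List.pyRange (top+1) (bottom+1) 1).map (fun i => (i.toNat, right.toNat)) ++
        ((PySem.List.pyRange (right-1) (left-1) (-1)).map (fun i => (bottom.toNat, i.toNat)) ++
          (PySem.List.pyRange (bottom-1) (top+1-1) (-1)).map (fun i => (i.toNat, left.toNat)))) ++
      (pvRotN (bottom-1+1-(top+1)).toNat (right-1+1-(left+1)).toNat).map
        (fun p => ((top+1).toNat + p.1, (left+1).toNat + p.2))
    = (pvRotN (bottom+1-top).toNat (right+1-left).toNat).map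
        (fun p => (top.toNat + p.1, left.toNat + p.2)) := by
  rw [show (bottom-1+1-(top+1)).toNat = (bottom+1-top).toNat - 2 from by omega,
      show (right-1+1-(left+1)).toNat = (right+1-left).toNat - 2 from by omega,
      PySem.List.pyRange_one, PySem.List.pyRange_one,
      PySem.List.pyRange_neg_one, PySem.List.pyRange_neg_one,
      pvRotN_peel ((bottom+1-top).toNat) ((right+1-left).toNat) (by omega) (by omega)]
  rw [show (bottom + 1 - (top+1)).toNat = (bottom+1-top).toNat - 1 from by omega,
      show ((right-1) - (left-1)).toNat = (right+1-left).toNat - 1 from by omega,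
      show ((bottom-1) - (top+1-1)).toNat = (bottom+1-top).toNat - 2 from by omega,
      show ((right+1) - left).toNat = (right+1-left).toNat from by omega]
  simp only [List.map_append, List.map_map, List.append_assoc]
  congr 1
  · refine List.map_congr_left (fun k hk => ?_)
    simp only [List.mem_range, Function.comp] at *
    simp only [Prod.mk.injEq]
    omega
  congr 1
  · refine List.map_congr_left (fun k hk => ?_)
    simp only [List.mem_range, Function.comp] at *
    simp only [Prod.mk.injEq]
    omega
  congr 1
  · refine List.map_congr_left (fun k hk => ?_)
    simp only [List.mem_range, Function.comp] at *
    simp only [Prod.mk.injEq]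
    omega
  congr 1
  · refine List.map_congr_left (fun k hk => ?_)
    simp only [List.mem_range, Function.comp] at *
    simp only [Prod.mk.injEq]
    omega
  · refine List.map_congr_left (fun p hp => ?_)
    have hb := pvRotN_mem_lt hp
    simp only [Function.comp, Prod.mk.injEq]
    omega

theorem pvLoopA_eq (text : String) : ∀ (fuel : Nat) (m : List (List String)) (t top bottom left right : Int),
    0 ≤ t → 0 ≤ top → 0 ≤ left → (bottom + 1 - top).toNat < fuel →
    pvLoopA text fuel m t top bottom left right =
      pvFillN m (((pvRotN (bottom + 1 - top).toNat (right + 1 - left).toNat).map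
        (fun p => (top.toNat + p.1, left.toNat + p.2))).zip (text.toList.drop t.toNat)) := by
  intro fuel
  induction fuel with
  | zero => intro m t top bottom left right _ _ _ hf; omega
  | succ fuel ih =>
    intro m t top bottom left right ht htop hleft hf
    rw [pvLoopA]
    by_cases hg : top ≤ bottom ∧ left ≤ right ∧ t < PySem.Str.len text
    · obtain ⟨hTB, hLR, hT⟩ := hg
      rw [if_pos ⟨hTB, hLR, hT⟩]
      by_cases hS : top + 1 ≤ bottom
      · by_cases hY : left ≤ right - 1
        · -- full ring: r' ≥ 2 and c' ≥ 2
          simp only [pvSegA_eq_segW, if_pos hS, if_pos hY]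
          rw [← pvSegW_append, ← pvSegW_append, ← pvSegW_append,
              pvSegW_eq text _ m t ht]
          rw [ih _ _ _ _ _ _ (by omega) (by omega) (by omega) (by omega)]
          dsimp only
          rw [show (t + ((((PySem.List.pyRange left (right+1) 1).map (fun i => (top.toNat, i.toNat)) ++
              ((PySem.List.pyRange (top+1) (bottom+1) 1).map (fun i => (i.toNat, right.toNat)) ++
                ((PySem.List.pyRange (right-1) (left-1) (-1)).map (fun i => (bottom.toNat, i.toNat)) ++
                  (PySem.List.pyRange (bottom-1) (top+1-1) (-1)).map (fun i => (i.toNat, left.toNat))))).zip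
              (text.toList.drop t.toNat)).length : Nat)).toNat
            = t.toNat + ((((PySem.List.pyRange left (right+1) 1).map (fun i => (top.toNat, i.toNat)) ++
              ((PySem.List.pyRange (top+1) (bottom+1) 1).map (fun i => (i.toNat, right.toNat)) ++
                ((PySem.List.pyRange (right-1) (left-1) (-1)).map (fun i => (bottom.toNat, i.toNat)) ++
                  (PySem.List.pyRange (bottom-1) (top+1-1) (-1)).map (fun i => (i.toNat, left.toNat))))).zip
              (text.toList.drop t.toNat)).length) from by omega,
            ← List.drop_drop, pvGlue]
          congr 1
          rw [← pvRing_concat top bottom left right htop hleft hS hY]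
        · -- single column: left = right
          have hrl : right = left := by omega
          subst hrl
          simp only [pvSegA_eq_segW, if_pos hS, if_neg hY]
          rw [PySem.List.pyRange_neg_one_eq_nil (le_refl (right - 1))]
          simp only [List.map_nil, pvSegW_nil]
          rw [← pvSegW_append, pvSegW_eq text _ m t ht]
          dsimp only
          rw [ih _ _ _ _ _ _ (by omega) (by omega) (by omega) (by omega)]
          rw [show (right - 1 + 1 - right).toNat = 0 from by omega, pvRotN_zero_right]
          simp only [List.map_nil, List.zip_nil_left, pvFillN_nil]
          rw [show (right + 1 - right).toNat = 1 from by omega,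
              pvRotN_col (bottom + 1 - top).toNat (by omega)]
          congr 2
          rw [PySem.List.pyRange_one_singleton, PySem.List.pyRange_one,
              show (bottom + 1 - (top + 1)).toNat = (bottom + 1 - top).toNat - 1 from by omega]
          simp only [List.map_cons, List.map_nil, List.map_map, List.singleton_append]
          congr 1
          refine List.map_congr_left (fun k hk => ?_)
          simp only [List.mem_range, Function.comp] at *
          simp only [Prod.mk.injEq]
          omega
      · -- single row: top = bottom
        have hbt : bottom = top := by omega
        subst hbt
        by_cases hY2 : left ≤ right - 1
        · simp only [pvSegA_eq_segW, if_neg hS, if_pos hY2]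
          rw [PySem.List.pyRange_one_eq_nil (by omega : bottom + 1 ≤ bottom + 1),
              PySem.List.pyRange_neg_one_eq_nil (by omega : bottom ≤ bottom + 1 - 1)]
          simp only [List.map_nil, pvSegW_nil]
          rw [pvSegW_eq text _ m t ht]
          dsimp only
          rw [ih _ _ _ _ _ _ (by omega) (by omega) (by omega) (by omega)]
          rw [show (bottom + 1 - (bottom + 1)).toNat = 0 from by omega, pvRotN_zero_left]
          simp only [List.map_nil, List.zip_nil_left, pvFillN_nil]
          rw [show (bottom + 1 - bottom).toNat = 1 from by omega, pvRotN_row]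
          congr 1
          rw [PySem.List.pyRange_one, List.map_map, List.map_map]
          congr 1
          refine List.map_congr_left (fun k hk => ?_)
          simp only [List.mem_range, Function.comp] at *
          simp only [Prod.mk.injEq]
          omega
        · simp only [pvSegA_eq_segW, if_neg hS, if_neg hY2]
          rw [PySem.List.pyRange_one_eq_nil (by omega : bottom + 1 ≤ bottom + 1)]
          simp only [List.map_nil, pvSegW_nil]
          rw [pvSegW_eq text _ m t ht]
          dsimp only
          rw [ih _ _ _ _ _ _ (by omega) (by omega) (by omega) (by omega)]
          rw [show (bottom + 1 - (bottom + 1)).toNat = 0 from by omega, pvRotN_zero_left]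
          simp only [List.map_nil, List.zip_nil_left, pvFillN_nil]
          rw [show (bottom + 1 - bottom).toNat = 1 from by omega, pvRotN_row]
          congr 1
          rw [PySem.List.pyRange_one, List.map_map, List.map_map]
          congr 1
          refine List.map_congr_left (fun k hk => ?_)
          simp only [List.mem_range, Function.comp] at *
          simp only [Prod.mk.injEq]
          omega
    · rw [if_neg hg]
      by_cases h1 : top ≤ bottom
      · by_cases h2 : left ≤ right
        · have h3 : ¬ t < PySem.Str.len text := by tauto
          have : text.toList.drop t.toNat = [] := by
            apply List.drop_eq_nil_of_le; rw [PySem.Str.len_eq] at h3; omega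
          simp [this, pvFillN]
        · have : (right + 1 - left).toNat = 0 := by omega
          rw [this, pvRotN_zero_right]; simp [pvFillN]
      · have : (bottom + 1 - top).toNat = 0 := by omega
        rw [this, pvRotN_zero_left]; simp [pvFillN]

theorem spiral_write_py_eq (text : String) (rows cols : Int) :
    spiral_write_py text rows cols = spiral_write_py_alt text rows cols := by
  rw [pvAlt_eq]
  unfold spiral_write_py
  rw [pvLoopA_eq text (rows.toNat + 1) _ 0 0 (rows - 1) 0 (cols - 1)
      (le_refl 0) (le_refl 0) (le_refl 0) (by omega)]
  rw [show (rows - 1 + 1 - 0).toNat = rows.toNat from by omega,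
      show (cols - 1 + 1 - 0).toNat = cols.toNat from by omega,
      show ((0 : Int)).toNat = 0 from rfl]
  rw [List.drop_zero]
  congr 1
  have : (pvRotN rows.toNat cols.toNat).map (fun p => (0 + p.1, 0 + p.2))
      = pvRotN rows.toNat cols.toNat := by
    refine (List.map_congr_left (fun p _ => ?_)).trans (List.map_id _)
    simp
  rw [this]

-- ===== VERDICT (by name: the statement is the Claim_ definition above) =====
theorem spiral_write_py_spec : Claim_equal_spiral_write_py := by
  intro text rows cols _
  exact spiral_write_py_eq text rows cols
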